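-- pv_equiv track=rewrite | github.com/nickfil/AdventOfCode | 2022/day-15/day15.py | getPossiblePoints
-- ===== SOURCE A (Python) =====
-- def getPossiblePoints(sensors, beacons):
--     p = set()
--     for i in range(len(sensors)):
--         maxDistance = abs(sensors[i][0] - beacons[i][0]) + abs(sensors[i][1] - beacons[i][1])
--         # from top to right
--         x, y = sensors[i][0], sensors[i][1] - maxDistance - 1
--         while y != sensors[i][1]:
--             p.add((x, y))
--             x += 1
--             y += 1
--         # from right to bottom
--         x, y = sensors[i][0] + maxDistance + 1, sensors[i][1]
--         while x != sensors[i][0]: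
--             p.add((x, y))
--             x -= 1
--             y += 1
--         # from bottom to left
--         x, y = sensors[i][0], sensors[i][1] + maxDistance + 1
--         while y != sensors[i][1]:
--             p.add((x, y))
--             x -= 1
--             y -= 1
--         # from left to top
--         x, y = sensors[i][0] - maxDistance - 1, sensors[i][1]
--         while x != sensors[i][0]:
--             p.add((x, y))
--             x += 1
--             y -= 1
--
--     return p
-- ===== SOURCE B (Python) =====
-- def getPossiblePoints(sensors, beacons):
--     p = set()
--     for (sx, sy), (bx, by) in zip(sensors, beacons):
--         r = abs(sx - bx) + abs(sy - by) + 1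
--         x, y, dx, dy = sx, sy - r, 1, -1
--         for _ in range(4 * r):
--             if x == sx or y == sy:  # on a corner of the diamond: turn 90° clockwise
--                 dx, dy = -dy, dx
--             p.add((x, y))
--             x += dx
--             y += dy
--     return p
-- ===== Notes on version B (the rewrite author's own statement) =====
-- stated objective: simpler
-- what changed: Replaces A's four separate sentinel-terminated while loops (one cursor reset per diamond edge) by a single turtle walk: one counted loop of 4*r steps carrying a direction vector that is rotated 90 degrees clockwise whenever the walker stands on a corner (x==sx or y==sy).
import Mathlib
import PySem

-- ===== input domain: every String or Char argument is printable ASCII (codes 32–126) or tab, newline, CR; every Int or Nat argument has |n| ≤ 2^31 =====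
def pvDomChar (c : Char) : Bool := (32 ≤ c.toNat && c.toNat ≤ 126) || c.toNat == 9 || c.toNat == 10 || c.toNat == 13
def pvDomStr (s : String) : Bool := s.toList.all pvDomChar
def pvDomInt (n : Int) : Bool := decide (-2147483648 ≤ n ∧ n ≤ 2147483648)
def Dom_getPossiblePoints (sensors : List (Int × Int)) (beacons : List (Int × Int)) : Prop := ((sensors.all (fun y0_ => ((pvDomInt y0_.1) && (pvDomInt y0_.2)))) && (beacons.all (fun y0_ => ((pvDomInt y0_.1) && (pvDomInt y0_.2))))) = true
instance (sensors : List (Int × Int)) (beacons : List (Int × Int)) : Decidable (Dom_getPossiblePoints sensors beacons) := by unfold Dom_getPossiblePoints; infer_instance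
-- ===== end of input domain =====

-- B replaces A's four sentinel-terminated while loops by a single turtle walk of 4*r counted
-- steps whose direction rotates 90° clockwise at each diamond corner; same set, no speed claim.

-- ===== PORT A =====
-- A's four while loops; an inner 'else p' guard makes each total (in A the cursor always
-- starts strictly on the approaching side, so that branch is never taken on A's calls).
def pvWalk1 (sy x y : Int) (p : PySem.Set (Int × Int)) : PySem.Set (Int × Int) :=
  if y = sy then p
  else if _h : y < sy then pvWalk1 sy (x + 1) (y + 1) (PySem.Set.add p (x, y))
  else p
termination_by (sy - y).toNat
decreasing_by omega

def pvWalk2 (sx x y : Int) (p : PySem.Set (Int × Int)) : PySem.Set (Int × Int) :=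
  if x = sx then p
  else if _h : sx < x then pvWalk2 sx (x - 1) (y + 1) (PySem.Set.add p (x, y))
  else p
termination_by (x - sx).toNat
decreasing_by omega

def pvWalk3 (sy x y : Int) (p : PySem.Set (Int × Int)) : PySem.Set (Int × Int) :=
  if y = sy then p
  else if _h : sy < y then pvWalk3 sy (x - 1) (y - 1) (PySem.Set.add p (x, y))
  else p
termination_by (y - sy).toNat
decreasing_by omega

def pvWalk4 (sx x y : Int) (p : PySem.Set (Int × Int)) : PySem.Set (Int × Int) :=
  if x = sx then p
  else if _h : x < sx then pvWalk4 sx (x + 1) (y - 1) (PySem.Set.add p (x, y))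
  else p
termination_by (sx - x).toNat
decreasing_by omega

def getPossiblePoints (sensors : List (Int × Int)) (beacons : List (Int × Int)) : List (Int × Int) :=
  (PySem.List.pyRange 0 sensors.length 1).foldl (fun p i =>
    let s := PySem.List.pyGetD sensors i (0, 0)   -- total form of sensors[i]; Pre_ keeps i in range
    let b := PySem.List.pyGetD beacons i (0, 0)   -- total form of beacons[i]; Pre_ keeps i in range
    let maxDistance := |s.1 - b.1| + |s.2 - b.2|
    let p1 := pvWalk1 s.2 s.1 (s.2 - maxDistance - 1) p
    let p2 := pvWalk2 s.1 (s.1 + maxDistance + 1) s.2 p1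
    let p3 := pvWalk3 s.2 s.1 (s.2 + maxDistance + 1) p2
    pvWalk4 s.1 (s.1 - maxDistance - 1) s.2 p3) PySem.Set.empty

-- ===== PORT B =====
-- Source B's inner 'for _ in range(4*r)' loop: fuel-counted recursion over the turtle state (x, y, dx, dy).
def pvTurtle (sx sy : Int) : Nat → Int → Int → Int → Int → PySem.Set (Int × Int) → PySem.Set (Int × Int)
  | 0, _, _, _, _, p => p
  | n + 1, x, y, dx, dy, p =>
    let d := if x = sx ∨ y = sy then (-dy, dx) else (dx, dy)
    pvTurtle sx sy n (x + d.1) (y + d.2) d.1 d.2 (PySem.Set.add p (x, y))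

def getPossiblePoints_alt (sensors : List (Int × Int)) (beacons : List (Int × Int)) : List (Int × Int) :=
  (sensors.zip beacons).foldl (fun p sb =>
    let sx := sb.1.1; let sy := sb.1.2; let bx := sb.2.1; let by_ := sb.2.2
    let r := |sx - bx| + |sy - by_| + 1
    pvTurtle sx sy (4 * r).toNat sx (sy - r) 1 (-1) p) PySem.Set.empty

-- ===== PRECONDITION & SPEC =====
-- A indexes beacons[i] for every i < len(sensors): it raises IndexError iff beacons is shorter.
def Pre_getPossiblePoints (sensors : List (Int × Int)) (beacons : List (Int × Int)) : Prop :=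
  sensors.length ≤ beacons.length
instance (sensors : List (Int × Int)) (beacons : List (Int × Int)) : Decidable (Pre_getPossiblePoints sensors beacons) := by unfold Pre_getPossiblePoints; infer_instance

def pvWitness_getPossiblePoints : (List (Int × Int)) × (List (Int × Int)) := ([(0, 0)], [(0, 1)])

def Spec_getPossiblePoints (sensors : List (Int × Int)) (beacons : List (Int × Int)) (out : List (Int × Int)) : Prop := out = getPossiblePoints_alt sensors beacons
instance (sensors : List (Int × Int)) (beacons : List (Int × Int)) (out : List (Int × Int)) : Decidable (Spec_getPossiblePoints sensors beacons out) := by unfold Spec_getPossiblePoints; infer_instance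

-- ===== CLAIM (what is proved, stated in full; the proofs are below) =====
def Claim_equal_getPossiblePoints : Prop := ∀ (sensors : List (Int × Int)) (beacons : List (Int × Int)), Dom_getPossiblePoints sensors beacons → Pre_getPossiblePoints sensors beacons → Spec_getPossiblePoints sensors beacons (getPossiblePoints sensors beacons)

-- ===== LEMMAS AND PROOFS =====

theorem pvWalk1_eq (sy : Int) : ∀ (m : Nat) (x : Int) (p : PySem.Set (Int × Int)),
    pvWalk1 sy x (sy - m) p
      = ((List.range m).map (fun k : Nat => ((x + k : Int), sy - m + k))).foldl PySem.Set.add p := by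
  intro m
  induction m with
  | zero => intro x p; rw [pvWalk1]; simp
  | succ m ih =>
    intro x p
    rw [pvWalk1]
    rw [if_neg (by push_cast; omega), dif_pos (by push_cast; omega)]
    have h3 : sy - (↑(m + 1) : Int) + 1 = sy - ↑m := by push_cast; ring
    rw [h3, ih]
    rw [List.range_succ_eq_map]
    simp only [List.map_cons, List.map_map, List.foldl_cons, Nat.cast_zero, add_zero]
    congr 1
    apply List.map_congr_left
    intro k _
    simp only [Function.comp, Prod.mk.injEq]
    push_cast
    constructor <;> ring

theorem pvWalk2_eq (sx : Int) : ∀ (m : Nat) (y : Int) (p : PySem.Set (Int × Int)),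
    pvWalk2 sx (sx + m) y p
      = ((List.range m).map (fun k : Nat => ((sx + m - k : Int), y + k))).foldl PySem.Set.add p := by
  intro m
  induction m with
  | zero => intro y p; rw [pvWalk2]; simp
  | succ m ih =>
    intro y p
    rw [pvWalk2]
    rw [if_neg (by push_cast; omega), dif_pos (by push_cast; omega)]
    have h3 : sx + (↑(m + 1) : Int) - 1 = sx + ↑m := by push_cast; ring
    rw [h3, ih]
    rw [List.range_succ_eq_map]
    simp only [List.map_cons, List.map_map, List.foldl_cons, Nat.cast_zero, add_zero, sub_zero]
    congr 1
    apply List.map_congr_left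
    intro k _
    simp only [Function.comp, Prod.mk.injEq]
    push_cast
    constructor <;> ring

theorem pvWalk3_eq (sy : Int) : ∀ (m : Nat) (x : Int) (p : PySem.Set (Int × Int)),
    pvWalk3 sy x (sy + m) p
      = ((List.range m).map (fun k : Nat => ((x - k : Int), sy + m - k))).foldl PySem.Set.add p := by
  intro m
  induction m with
  | zero => intro x p; rw [pvWalk3]; simp
  | succ m ih =>
    intro x p
    rw [pvWalk3]
    rw [if_neg (by push_cast; omega), dif_pos (by push_cast; omega)]
    have h3 : sy + (↑(m + 1) : Int) - 1 = sy + ↑m := by push_cast; ring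
    rw [h3, ih]
    rw [List.range_succ_eq_map]
    simp only [List.map_cons, List.map_map, List.foldl_cons, Nat.cast_zero, sub_zero]
    congr 1
    apply List.map_congr_left
    intro k _
    simp only [Function.comp, Prod.mk.injEq]
    push_cast
    constructor <;> ring

theorem pvWalk4_eq (sx : Int) : ∀ (m : Nat) (y : Int) (p : PySem.Set (Int × Int)),
    pvWalk4 sx (sx - m) y p
      = ((List.range m).map (fun k : Nat => ((sx - m + k : Int), y - k))).foldl PySem.Set.add p := by
  intro m
  induction m with
  | zero => intro y p; rw [pvWalk4]; simp
  | succ m ih =>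
    intro y p
    rw [pvWalk4]
    rw [if_neg (by push_cast; omega), dif_pos (by push_cast; omega)]
    have h3 : sx - (↑(m + 1) : Int) + 1 = sx - ↑m := by push_cast; ring
    rw [h3, ih]
    rw [List.range_succ_eq_map]
    simp only [List.map_cons, List.map_map, List.foldl_cons, Nat.cast_zero, add_zero, sub_zero]
    congr 1
    apply List.map_congr_left
    intro k _
    simp only [Function.comp, Prod.mk.injEq]
    push_cast
    constructor <;> ring

-- the turtle on a straight stretch (no corner for m steps) is a foldl over the m points
theorem pvStraight (sx sy dx dy : Int) : ∀ (m n : Nat) (x y : Int) (p : PySem.Set (Int × Int)),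
    (∀ k : Nat, k < m → x + k * dx ≠ sx ∧ y + k * dy ≠ sy) →
    pvTurtle sx sy (m + n) x y dx dy p
      = pvTurtle sx sy n (x + m * dx) (y + m * dy) dx dy
          (((List.range m).map (fun k : Nat => ((x + k * dx : Int), y + k * dy))).foldl PySem.Set.add p) := by
  intro m
  induction m with
  | zero => intro n x y p _; simp
  | succ m ih =>
    intro n x y p h
    rw [show m + 1 + n = (m + n) + 1 from by omega]
    rw [pvTurtle]
    have h0 := h 0 (by omega)
    simp only [Nat.cast_zero, zero_mul, add_zero] at h0
    rw [if_neg (by tauto)]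
    dsimp only
    rw [ih n (x + dx) (y + dy) _ (by
      intro k hk
      have hk1 := h (k + 1) (by omega)
      push_cast at hk1 ⊢
      refine ⟨fun hc => hk1.1 ?_, fun hc => hk1.2 ?_⟩ <;> rw [← hc] <;> ring)]
    have hl : (List.range (m + 1)).map (fun k : Nat => ((x + k * dx : Int), y + k * dy))
        = (x, y) :: (List.range m).map (fun k : Nat => ((x + dx + k * dx : Int), y + dy + k * dy)) := by
      rw [List.range_succ_eq_map]
      simp only [List.map_cons, List.map_map, Nat.cast_zero, zero_mul, add_zero]
      congr 1
      apply List.map_congr_left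
      intro k _
      simp only [Function.comp, Prod.mk.injEq]
      push_cast
      constructor <;> ring
    rw [hl]
    simp only [List.foldl_cons]
    rw [show x + ((m : Nat) + 1 : Nat) * dx = x + dx + (m : Int) * dx from by push_cast; ring,
        show y + ((m : Nat) + 1 : Nat) * dy = y + dy + (m : Int) * dy from by push_cast; ring]

-- the turtle with fuel exactly m on a straight stretch
theorem pvStraightAll (sx sy dx dy : Int) (m : Nat) (x y : Int) (p : PySem.Set (Int × Int))
    (h : ∀ k : Nat, k < m → x + k * dx ≠ sx ∧ y + k * dy ≠ sy) :
    pvTurtle sx sy m x y dx dy p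
      = ((List.range m).map (fun k : Nat => ((x + k * dx : Int), y + k * dy))).foldl PySem.Set.add p := by
  have h0 := pvStraight sx sy dx dy m 0 x y p h
  rw [Nat.add_zero] at h0
  rw [h0, pvTurtle]

-- the turtle on a corner: turn clockwise, record the point, step
theorem pvCorner (sx sy dx dy x y : Int) (n : Nat) (p : PySem.Set (Int × Int))
    (h : x = sx ∨ y = sy) :
    pvTurtle sx sy (n + 1) x y dx dy p
      = pvTurtle sx sy n (x + -dy) (y + dx) (-dy) dx (PySem.Set.add p (x, y)) := by
  rw [pvTurtle, if_pos h]

-- the two per-sensor bodies agree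
theorem pvBody_eq (s b : Int × Int) (p : PySem.Set (Int × Int)) :
    (let maxDistance := |s.1 - b.1| + |s.2 - b.2|
     pvWalk4 s.1 (s.1 - maxDistance - 1) s.2
       (pvWalk3 s.2 s.1 (s.2 + maxDistance + 1)
         (pvWalk2 s.1 (s.1 + maxDistance + 1) s.2
           (pvWalk1 s.2 s.1 (s.2 - maxDistance - 1) p))))
    = (let r := |s.1 - b.1| + |s.2 - b.2| + 1
       pvTurtle s.1 s.2 (4 * r).toNat s.1 (s.2 - r) 1 (-1) p) := by
  have hd : (0 : Int) ≤ |s.1 - b.1| + |s.2 - b.2| := by positivity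
  obtain ⟨t, ht⟩ : ∃ t : Nat, ((t : Int) + 1) = |s.1 - b.1| + |s.2 - b.2| + 1 :=
    ⟨(|s.1 - b.1| + |s.2 - b.2|).toNat, by omega⟩
  dsimp only
  rw [show s.2 - (|s.1 - b.1| + |s.2 - b.2|) - 1 = s.2 - ((t + 1 : Nat) : Int) from by push_cast; omega]
  rw [show s.1 + (|s.1 - b.1| + |s.2 - b.2|) + 1 = s.1 + ((t + 1 : Nat) : Int) from by push_cast; omega]
  rw [show s.2 + (|s.1 - b.1| + |s.2 - b.2|) + 1 = s.2 + ((t + 1 : Nat) : Int) from by push_cast; omega]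
  rw [show s.1 - (|s.1 - b.1| + |s.2 - b.2|) - 1 = s.1 - ((t + 1 : Nat) : Int) from by push_cast; omega]
  rw [show |s.1 - b.1| + |s.2 - b.2| + 1 = ((t + 1 : Nat) : Int) from by push_cast; omega]
  rw [show (4 * ((t + 1 : Nat) : Int)).toNat = (1 + t) + ((1 + t) + ((1 + t) + ((1 + t) + 0))) from by push_cast; omega]
  -- quarter 1: corner at the top, then t straight steps down-right
  rw [show (1 + t) + ((1 + t) + ((1 + t) + ((1 + t) + 0))) = (t + ((1 + t) + ((1 + t) + ((1 + t) + 0)))) + 1 from by omega]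
  rw [pvCorner _ _ _ _ _ _ _ _ (Or.inl rfl)]
  norm_num
  rw [pvStraight s.1 s.2 1 1 t _ _ _ _ (fun k hk => ⟨by omega, by omega⟩)]
  -- quarter 2: right corner, then t straight steps down-left
  rw [show 1 + t + (1 + t + (1 + t)) = (t + (1 + t + (1 + t))) + 1 from by omega]
  rw [pvCorner _ _ _ _ _ _ _ _ (Or.inr (by ring))]
  norm_num
  rw [pvStraight s.1 s.2 (-1) 1 t _ _ _ _ (fun k hk => ⟨by omega, by omega⟩)]
  -- quarter 3: bottom corner, then t straight steps up-left
  rw [show 1 + t + (1 + t) = (t + (1 + t)) + 1 from by omega]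
  rw [pvCorner _ _ _ _ _ _ _ _ (Or.inl (by ring))]
  norm_num
  rw [pvStraight s.1 s.2 (-1) (-1) t _ _ _ _ (fun k hk => ⟨by omega, by omega⟩)]
  -- quarter 4: left corner, then t straight steps up-right
  rw [show 1 + t = t + 1 from by omega]
  rw [pvCorner _ _ _ _ _ _ _ _ (Or.inr (by ring))]
  norm_num
  rw [pvStraightAll s.1 s.2 1 (-1) t _ _ _ (fun k hk => ⟨by omega, by omega⟩)]
  rw [show ((t : Int) + 1) = ((t + 1 : Nat) : Int) from by push_cast; ring]
  -- now rewrite A's four walks into foldls over the same points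
  rw [pvWalk1_eq s.2 (t + 1), pvWalk2_eq s.1 (t + 1), pvWalk3_eq s.2 (t + 1), pvWalk4_eq s.1 (t + 1)]
  -- peel the corner off each (range (t+1)) list and align the straight parts
  have hpeel : ∀ (f : Nat → Int × Int) (g : Nat → Int × Int) (q : PySem.Set (Int × Int)),
      (∀ k : Nat, k < t → f (k + 1) = g k) →
      ((List.range (t + 1)).map f).foldl PySem.Set.add q
        = ((List.range t).map g).foldl PySem.Set.add (PySem.Set.add q (f 0)) := by
    intro f g q hfg
    rw [List.range_succ_eq_map]
    simp only [List.map_cons, List.map_map, List.foldl_cons]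
    congr 1
    apply List.map_congr_left
    intro k hk
    simp only [Function.comp]
    exact hfg k (List.mem_range.mp hk)
  rw [hpeel _ (fun k : Nat => ((s.1 - (t + 1 : Nat) + 1 + k * 1 : Int), s.2 + -1 + k * (-1))) _
        (fun k hk => by simp only [Prod.mk.injEq]; push_cast; constructor <;> ring)]
  rw [hpeel _ (fun k : Nat => ((s.1 + -1 + k * (-1) : Int), s.2 + (t + 1 : Nat) + -1 + k * (-1))) _
        (fun k hk => by simp only [Prod.mk.injEq]; push_cast; constructor <;> ring)]
  rw [hpeel _ (fun k : Nat => ((s.1 + (t + 1 : Nat) + -1 + k * (-1) : Int), s.2 + 1 + k * 1)) _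
        (fun k hk => by simp only [Prod.mk.injEq]; push_cast; constructor <;> ring)]
  rw [hpeel _ (fun k : Nat => ((s.1 + 1 + k * 1 : Int), s.2 - (t + 1 : Nat) + 1 + k * 1)) p
        (fun k hk => by simp only [Prod.mk.injEq]; push_cast; constructor <;> ring)]
  norm_num
  ring_nf

-- ===== VERDICT (by name: the statement is the Claim_ definition above) =====
theorem getPossiblePoints_spec : Claim_equal_getPossiblePoints := by
  intro ss bs _ hpre
  unfold Pre_getPossiblePoints at hpre
  unfold Spec_getPossiblePoints getPossiblePoints getPossiblePoints_alt
  have hstep : ∀ (acc : PySem.Set (Int × Int)) (i : Int), i ∈ PySem.List.pyRange 0 ss.length 1 →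
      (fun (p : PySem.Set (Int × Int)) (i : Int) =>
        let s := PySem.List.pyGetD ss i (0, 0)
        let b := PySem.List.pyGetD bs i (0, 0)
        let maxDistance := |s.1 - b.1| + |s.2 - b.2|
        let p1 := pvWalk1 s.2 s.1 (s.2 - maxDistance - 1) p
        let p2 := pvWalk2 s.1 (s.1 + maxDistance + 1) s.2 p1
        let p3 := pvWalk3 s.2 s.1 (s.2 + maxDistance + 1) p2
        pvWalk4 s.1 (s.1 - maxDistance - 1) s.2 p3) acc i
      = (fun (p : PySem.Set (Int × Int)) (i : Int) =>
          (fun (p : PySem.Set (Int × Int)) (sb : (Int × Int) × (Int × Int)) =>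
            let sx := sb.1.1; let sy := sb.1.2; let bx := sb.2.1; let by_ := sb.2.2
            let r := |sx - bx| + |sy - by_| + 1
            pvTurtle sx sy (4 * r).toNat sx (sy - r) 1 (-1) p)
            p (PySem.List.pyGetD (ss.zip bs) i ((0, 0), (0, 0)))) acc i := by
    intro acc i hi
    obtain ⟨h0, h1⟩ := (PySem.List.mem_pyRange_one).mp hi
    obtain ⟨n, rfl⟩ : ∃ n : Nat, i = (n : Int) := ⟨i.toNat, by omega⟩
    have hn1 : n < ss.length := by exact_mod_cast h1
    have hn2 : n < bs.length := by omega
    have hnz : n < (ss.zip bs).length := by rw [List.length_zip]; omega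
    simp only [PySem.List.pyGetD_natCast]
    rw [List.getD_eq_getElem ss _ hn1, List.getD_eq_getElem bs _ hn2,
        List.getD_eq_getElem (ss.zip bs) _ hnz, List.getElem_zip]
    exact pvBody_eq _ _ _
  rw [PySem.List.foldl_congr_mem _ _ _ _ hstep]
  rw [show ((ss.length : Int)) = (((ss.zip bs).length : Int)) by rw [List.length_zip]; push_cast; omega]
  exact PySem.List.foldl_pyRange_zero_pyGetD' (ss.zip bs) ((0, 0), (0, 0))
    (fun (p : PySem.Set (Int × Int)) (sb : (Int × Int) × (Int × Int)) =>
      let sx := sb.1.1; let sy := sb.1.2; let bx := sb.2.1; let by_ := sb.2.2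
      let r := |sx - bx| + |sy - by_| + 1
      pvTurtle sx sy (4 * r).toNat sx (sy - r) 1 (-1) p)
    PySem.Set.empty
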